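-- pv_equiv track=rewrite | github.com/luciendgolden/RTA | augment_service/clean/clean_data.py | clean_switchboard
-- ===== SOURCE A (Python) =====
-- def clean_switchboard(lines):
--     """ For switchboard, we join every 5 lines. """
--     new_lines = []
--     count = 0
--     joined = []
--     for line in lines:
--         new_line = line.strip()
--         joined.append(new_line)
--         count += 1
--         if count % 5 == 0:
--             new_lines.append(" ".join(joined) + '\n')
--             joined = []
--     return new_lines
-- ===== SOURCE B (Python) =====
-- def clean_switchboard(lines):
--     """ For switchboard, we join every 5 lines. """
--     out = []
--     i = 0
--     while i + 5 <= len(lines):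
--         out.append(" ".join(l.strip() for l in lines[i:i+5]) + '\n')
--         i += 5
--     return out
-- ===== Notes on version B (the rewrite author's own statement) =====
-- stated objective: simpler
-- what changed: Replaces the per-line counter/joined-accumulator pass with direct chunking: an index loop that slices each full 5-line block lines[i:i+5] and joins its stripped lines, dropping the trailing partial block implicitly.
import Mathlib
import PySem

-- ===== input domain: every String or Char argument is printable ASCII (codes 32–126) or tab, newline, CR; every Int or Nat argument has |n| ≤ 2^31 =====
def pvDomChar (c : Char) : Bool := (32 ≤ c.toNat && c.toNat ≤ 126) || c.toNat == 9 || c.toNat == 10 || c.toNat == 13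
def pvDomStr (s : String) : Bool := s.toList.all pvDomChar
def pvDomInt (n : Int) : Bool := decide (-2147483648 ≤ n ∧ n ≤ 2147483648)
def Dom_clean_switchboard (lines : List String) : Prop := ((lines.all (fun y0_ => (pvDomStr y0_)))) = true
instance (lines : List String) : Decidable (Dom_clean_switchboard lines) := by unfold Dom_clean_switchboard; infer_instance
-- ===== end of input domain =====

-- B replaces A's per-line counter/accumulator with direct chunking into 5-line slices (simpler decomposition; same cost).


-- ===== PORT A =====
-- one iteration of A's for-loop; state = (new_lines, count, joined)
def cs_step (st : List String × Int × List String) (line : String) : List String × Int × List String :=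
  let new_line := PySem.Str.strip line
  let joined := st.2.2 ++ [new_line]
  let count := st.2.1 + 1
  if PySem.Int.mod count 5 = 0 then
    (st.1 ++ [PySem.Str.join " " joined ++ "\n"], count, ([] : List String))
  else
    (st.1, count, joined)

def clean_switchboard (lines : List String) : List String :=
  (lines.foldl cs_step ([], 0, [])).1

-- ===== PORT B =====
-- B's while-loop over the index i: emit one joined line per full 5-block lines[i:i+5], step i by 5.
def cs_go (lines : List String) (i : Int) : List String :=
  if i + 5 ≤ (lines.length : Int) then
    (PySem.Str.join " " ((PySem.List.slice lines (some i) (some (i + 5))).map PySem.Str.strip) ++ "\n")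
      :: cs_go lines (i + 5)
  else []
termination_by ((lines.length : Int) - i).toNat
decreasing_by omega

def clean_switchboard_alt (lines : List String) : List String :=
  cs_go lines 0

-- ===== PRECONDITION & SPEC =====
def Spec_clean_switchboard (lines : List String) (out : List String) : Prop := out = clean_switchboard_alt lines
instance (lines : List String) (out : List String) : Decidable (Spec_clean_switchboard lines out) := by unfold Spec_clean_switchboard; infer_instance

-- ===== CLAIM (what is proved, stated in full; the proofs are below) =====
def Claim_equal_clean_switchboard : Prop := ∀ (lines : List String), Dom_clean_switchboard lines → Spec_clean_switchboard lines (clean_switchboard lines)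

-- ===== LEMMAS AND PROOFS =====

-- proof-side view of B's loop: the chunks of the not-yet-processed suffix
def cs_chunks (rest : List String) : List String :=
  if 5 ≤ rest.length then
    (PySem.Str.join " " ((rest.take 5).map PySem.Str.strip) ++ "\n") :: cs_chunks (rest.drop 5)
  else []
termination_by rest.length
decreasing_by simp; omega

lemma cs_go_eq_chunks : ∀ (n : Nat) (lines : List String) (i : Int),
    ((lines.length : Int) - i).toNat = n → 0 ≤ i →
    cs_go lines i = cs_chunks (lines.drop i.toNat) := by
  intro n
  induction n using Nat.strong_induction_on with
  | _ n ih =>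
    intro lines i hn hi
    rw [cs_go, cs_chunks]
    have hlen : (lines.drop i.toNat).length = lines.length - i.toNat := List.length_drop
    by_cases h : i + 5 ≤ (lines.length : Int)
    · rw [if_pos h, if_pos (by omega)]
      rw [PySem.List.slice_toNat lines hi (by omega)]
      have h5 : (i + 5).toNat - i.toNat = 5 := by omega
      rw [h5, ih ((lines.length : Int) - (i + 5)).toNat (by omega) lines (i + 5) rfl (by omega)]
      have : (i + 5).toNat = i.toNat + 5 := by omega
      rw [this, ← List.drop_drop]
    · rw [if_neg h, if_neg (by omega)]

lemma cs_main : ∀ (n : Nat) (rest : List String), rest.length = n →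
    ∀ (acc : List String) (count : Int), count % 5 = 0 →
    (rest.foldl cs_step (acc, count, [])).1 = acc ++ cs_chunks rest := by
  intro n
  induction n using Nat.strong_induction_on with
  | _ n ih =>
    intro rest hlen acc count hc
    by_cases h5 : 5 ≤ rest.length
    · rcases rest with _ | ⟨a, _ | ⟨b, _ | ⟨c, _ | ⟨d, _ | ⟨e, rest'⟩⟩⟩⟩⟩
      all_goals try simp at h5
      have h1 : (count + 1) % 5 ≠ 0 := by omega
      have h2 : (count + 1 + 1) % 5 ≠ 0 := by omega
      have h3 : (count + 1 + 1 + 1) % 5 ≠ 0 := by omega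
      have h4 : (count + 1 + 1 + 1 + 1) % 5 ≠ 0 := by omega
      have h5' : (count + 1 + 1 + 1 + 1 + 1) % 5 = 0 := by omega
      simp [List.foldl, cs_step, h1, h2, h3, h4, h5']
      rw [ih rest'.length (by simp at hlen ⊢; omega) rest' rfl _ _ h5']
      conv_rhs => rw [cs_chunks]
      simp
    · rw [cs_chunks, if_neg h5]
      have h1 : (count + 1) % 5 ≠ 0 := by omega
      have h2 : (count + 1 + 1) % 5 ≠ 0 := by omega
      have h3 : (count + 1 + 1 + 1) % 5 ≠ 0 := by omega
      have h4 : (count + 1 + 1 + 1 + 1) % 5 ≠ 0 := by omega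
      match rest, h5 with
      | [], _ => simp
      | [a], _ => simp [List.foldl, cs_step, h1]
      | [a,b], _ => simp [List.foldl, cs_step, h1, h2]
      | [a,b,c], _ => simp [List.foldl, cs_step, h1, h2, h3]
      | [a,b,c,d], _ => simp [List.foldl, cs_step, h1, h2, h3, h4]
      | a::b::c::d::e::r, h5 => simp at h5

-- ===== VERDICT (by name: the statement is the Claim_ definition above) =====
theorem clean_switchboard_spec : Claim_equal_clean_switchboard := by
  intro lines _
  show clean_switchboard lines = clean_switchboard_alt lines
  unfold clean_switchboard clean_switchboard_alt
  rw [cs_go_eq_chunks ((lines.length : Int) - 0).toNat lines 0 rfl (by decide)]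
  simpa using cs_main lines.length lines rfl [] 0 (by decide)
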